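-- pv_equiv track=rewrite | github.com/Nghia03092004/nghia03092004.github.io | project_euler_unified/problem_932/solution.py | solve
-- ===== SOURCE A (Python) =====
-- def solve(limit):
--     """Count pairs (a,b), 1<=a<b<=limit, where T_a + T_b is triangular."""
--     tri_set = set()
--     n = 1
--     max_val = limit * (limit + 1)  # T_a + T_b <= T_limit + T_limit ~ limit^2
--     while n * (n + 1) // 2 <= max_val:
--         tri_set.add(n * (n + 1) // 2)
--         n += 1
--     count = 0
--     pairs = []
--     for a in range(1, limit + 1):
--         ta = a * (a + 1) // 2
--         for b in range(a + 1, limit + 1):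
--             tb = b * (b + 1) // 2
--             if ta + tb in tri_set:
--                 count += 1
--                 if len(pairs) < 500:
--                     pairs.append((a, b))
--     return count, pairs
-- ===== SOURCE B (Python) =====
-- def solve(limit):
--     count = 0
--     pairs = []
--     ta = 0
--     for a in range(1, limit + 1):
--         ta += a                      # ta = T_a
--         tb = ta
--         n = a                        # pointer: n, t with t = T_n
--         t = ta
--         for b in range(a + 1, limit + 1):
--             tb += b                  # tb = T_b
--             s = ta + tb
--             while t < s:
--                 n += 1
--                 t += n
--             if t == s:
--                 count += 1
--                 if len(pairs) < 500:
--                     pairs.append((a, b))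
--     return count, pairs
-- ===== Notes on version B (the rewrite author's own statement) =====
-- stated objective: alternative
-- what changed: Replaces the precomputed hash set of all triangular numbers by a monotone pointer per row: T_a+T_b grows with b, so a single (n, T_n) pair is advanced to the least triangular number >= T_a+T_b and compared for equality; all triangular values are maintained incrementally by additions, so the set, the hashing and all multiplications/divisions disappear.
import Mathlib
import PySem

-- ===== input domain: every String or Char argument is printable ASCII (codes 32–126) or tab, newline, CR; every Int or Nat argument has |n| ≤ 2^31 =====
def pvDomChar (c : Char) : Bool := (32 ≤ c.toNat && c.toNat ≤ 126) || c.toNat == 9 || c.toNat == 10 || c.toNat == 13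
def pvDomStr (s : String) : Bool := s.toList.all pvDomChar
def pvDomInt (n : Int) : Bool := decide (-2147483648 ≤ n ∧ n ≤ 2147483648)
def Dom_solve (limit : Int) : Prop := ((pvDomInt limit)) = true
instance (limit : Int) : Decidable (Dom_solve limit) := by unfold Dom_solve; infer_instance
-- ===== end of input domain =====

-- B replaces A's precomputed set of triangular numbers by a monotone pointer advanced
-- per row (alternative algorithm, same asymptotic cost); return values are identical.

-- Termination helper for both while loops: n*(n+1)//2 doubles back exactly (n*(n+1) is even).
theorem pvTriDouble (n : Int) : 2 * PySem.Int.floordiv (n * (n + 1)) 2 = n * (n + 1) := by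
  rw [PySem.Int.floordiv_eq_ediv_of_pos (by norm_num)]
  exact Int.mul_ediv_cancel' (Int.even_mul_succ_self n).two_dvd

-- ===== PORT A =====
-- while n*(n+1)//2 <= max_val: tri_set.add(n*(n+1)//2); n += 1
def triBuild (maxVal : Int) (n : Int) (s : PySem.Set Int) : PySem.Set Int :=
  if PySem.Int.floordiv (n * (n + 1)) 2 ≤ maxVal then
    triBuild maxVal (n + 1) (PySem.Set.add s (PySem.Int.floordiv (n * (n + 1)) 2))
  else s
termination_by (maxVal + 1 - n).toNat
decreasing_by
  have h2 := pvTriDouble n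
  have hnn : 0 ≤ n * (n + 1) := by nlinarith [sq_nonneg (2 * n + 1)]
  have hle : n ≤ 0 ∨ 2 * n ≤ n * (n + 1) := by
    rcases (by omega : n ≤ 0 ∨ 1 ≤ n) with h | h
    · exact Or.inl h
    · exact Or.inr (by nlinarith)
  rename_i h
  omega

def solve (limit : Int) : Int × (List (Int × Int)) :=
  let maxVal := limit * (limit + 1)
  let triSet := triBuild maxVal 1 PySem.Set.empty
  (PySem.List.pyRange 1 (limit + 1) 1).foldl (fun acc a =>
    let ta := PySem.Int.floordiv (a * (a + 1)) 2
    (PySem.List.pyRange (a + 1) (limit + 1) 1).foldl (fun acc b =>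
      let tb := PySem.Int.floordiv (b * (b + 1)) 2
      if PySem.Set.contains triSet (ta + tb) then
        (acc.1 + 1, if acc.2.length < 500 then acc.2 ++ [(a, b)] else acc.2)
      else acc) acc) ((0 : Int), ([] : List (Int × Int)))

-- ===== PORT B =====
-- while t < s: n += 1; t += n      (t maintains n*(n+1)//2 incrementally)
def advance2 (s : Int) (n : Int) (t : Int) : Int × Int :=
  if t < s then advance2 s (n + 1) (t + (n + 1)) else (n, t)
termination_by ((-n).toNat, (s - t).toNat)
decreasing_by
  rcases (by omega : n < 0 ∨ 0 ≤ n) with h | h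
  · exact Prod.Lex.left _ _ (by omega)
  · have e : (-(n + 1)).toNat = (-n).toNat := by omega
    rw [e]
    exact Prod.Lex.right _ (by omega)

def solve_alt (limit : Int) : Int × (List (Int × Int)) :=
  ((PySem.List.pyRange 1 (limit + 1) 1).foldl
    (fun (st : (Int × List (Int × Int)) × Int) a =>
      let ta := st.2 + a
      let inner := (PySem.List.pyRange (a + 1) (limit + 1) 1).foldl
        (fun (w : (Int × List (Int × Int)) × Int × Int × Int) b =>
          let tb := w.2.1 + b
          let s := ta + tb
          let nt := advance2 s w.2.2.1 w.2.2.2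
          if nt.2 = s then
            ((w.1.1 + 1, if w.1.2.length < 500 then w.1.2 ++ [(a, b)] else w.1.2), tb, nt.1, nt.2)
          else (w.1, tb, nt.1, nt.2)) (st.1, ta, a, ta)
      (inner.1, ta)) (((0 : Int), ([] : List (Int × Int))), (0 : Int))).1

-- ===== PRECONDITION & SPEC =====
def Spec_solve (limit : Int) (out : Int × (List (Int × Int))) : Prop := out = solve_alt limit
instance (limit : Int) (out : Int × (List (Int × Int))) : Decidable (Spec_solve limit out) := by unfold Spec_solve; infer_instance

-- ===== CLAIM (what is proved, stated in full; the proofs are below) =====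
def Claim_equal_solve : Prop := ∀ (limit : Int), Dom_solve limit → Spec_solve limit (solve limit)

-- ===== LEMMAS AND PROOFS =====

-- abbreviation used only in proofs
def pvT (n : Int) : Int := PySem.Int.floordiv (n * (n + 1)) 2

theorem pvT_double (n : Int) : 2 * pvT n = n * (n + 1) := pvTriDouble n

theorem pvT_nonneg (n : Int) : 0 ≤ pvT n := by
  have := pvT_double n
  nlinarith [sq_nonneg (2 * n + 1)]

theorem pvT_lt_of_lt {m n : Int} (hm : 0 ≤ m) (h : m < n) : pvT m < pvT n := by
  have h1 := pvT_double m
  have h2 := pvT_double n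
  nlinarith

theorem pvT_le_of_le {m n : Int} (hm : 0 ≤ m) (h : m ≤ n) : pvT m ≤ pvT n := by
  rcases eq_or_lt_of_le h with rfl | h'
  · exact le_refl _
  · exact le_of_lt (pvT_lt_of_lt hm h')

-- the predicate both membership tests decide
def pvIsTri (x : Int) : Prop := ∃ k : Int, 1 ≤ k ∧ pvT k = x

theorem pvT_def (n : Int) : PySem.Int.floordiv (n * (n + 1)) 2 = pvT n := rfl

-- A side: characterisation of the built set
theorem triBuild_mem (maxVal n : Int) (s : PySem.Set Int) (hn : 1 ≤ n) (x : Int) :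
    x ∈ triBuild maxVal n s ↔ x ∈ s ∨ ∃ k, n ≤ k ∧ pvT k ≤ maxVal ∧ pvT k = x := by
  fun_induction triBuild maxVal n s with
  | case1 n s h ih =>
    rw [pvT_def] at h
    rw [ih (by omega), PySem.Set.mem_add, pvT_def]
    constructor
    · rintro ((hs | rfl) | ⟨k, hk1, hk2, hk3⟩)
      · exact Or.inl hs
      · exact Or.inr ⟨n, by omega, h, rfl⟩
      · exact Or.inr ⟨k, by omega, hk2, hk3⟩
    · rintro (hs | ⟨k, hk1, hk2, hk3⟩)
      · exact Or.inl (Or.inl hs)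
      · rcases (by omega : k = n ∨ n + 1 ≤ k) with rfl | hk
        · exact Or.inl (Or.inr hk3.symm)
        · exact Or.inr ⟨k, hk, hk2, hk3⟩
  | case2 n s h =>
    rw [pvT_def] at h
    constructor
    · exact Or.inl
    · rintro (hs | ⟨k, hk1, hk2, hk3⟩)
      · exact hs
      · exact absurd (le_trans (pvT_le_of_le (by omega) hk1) hk2) h

theorem triSet_contains (limit x : Int) (hx : x ≤ limit * (limit + 1)) :
    PySem.Set.contains (triBuild (limit * (limit + 1)) 1 PySem.Set.empty) x = true ↔ pvIsTri x := by
  rw [PySem.Set.contains_iff, triBuild_mem _ _ _ (by omega)]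
  constructor
  · rintro (hs | ⟨k, hk1, hk2, hk3⟩)
    · simp [PySem.Set.empty] at hs
    · exact ⟨k, hk1, hk3⟩
  · rintro ⟨k, hk1, hk2⟩
    exact Or.inr ⟨k, hk1, hk2 ▸ hx, hk2⟩

-- named forms of the two inner-loop step functions (proof-side only; the ports are rfl-equal to folds over them)
def aInnerStep (limit a : Int) (acc : Int × List (Int × Int)) (b : Int) : Int × List (Int × Int) :=
  if PySem.Set.contains (triBuild (limit * (limit + 1)) 1 PySem.Set.empty)
      (PySem.Int.floordiv (a * (a + 1)) 2 + PySem.Int.floordiv (b * (b + 1)) 2) then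
    (acc.1 + 1, if acc.2.length < 500 then acc.2 ++ [(a, b)] else acc.2)
  else acc

def bInnerStep (ta a : Int) (w : (Int × List (Int × Int)) × Int × Int × Int) (b : Int) :
    (Int × List (Int × Int)) × Int × Int × Int :=
  let tb := w.2.1 + b
  let s := ta + tb
  let nt := advance2 s w.2.2.1 w.2.2.2
  if nt.2 = s then
    ((w.1.1 + 1, if w.1.2.length < 500 then w.1.2 ++ [(a, b)] else w.1.2), tb, nt.1, nt.2)
  else (w.1, tb, nt.1, nt.2)

def bOuterStep (limit : Int) (st : (Int × List (Int × Int)) × Int) (a : Int) :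
    (Int × List (Int × Int)) × Int :=
  (((PySem.List.pyRange (a + 1) (limit + 1) 1).foldl (bInnerStep (st.2 + a) a)
      (st.1, st.2 + a, a, st.2 + a)).1, st.2 + a)

theorem solve_eq_fold (limit : Int) :
    solve limit = (PySem.List.pyRange 1 (limit + 1) 1).foldl
      (fun acc a => (PySem.List.pyRange (a + 1) (limit + 1) 1).foldl (aInnerStep limit a) acc)
      ((0 : Int), ([] : List (Int × Int))) := rfl

theorem solve_alt_eq_fold (limit : Int) :
    solve_alt limit = ((PySem.List.pyRange 1 (limit + 1) 1).foldl (bOuterStep limit)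
      (((0 : Int), ([] : List (Int × Int))), (0 : Int))).1 := rfl

theorem pvT_succ (n : Int) : pvT (n + 1) = pvT n + (n + 1) := by
  have h1 := pvT_double n
  have h2 := pvT_double (n + 1)
  nlinarith

theorem pvT_step (c : Int) : pvT (c - 1) + c = pvT c := by
  have h := pvT_succ (c - 1)
  rw [show c - 1 + 1 = c by omega] at h
  omega

-- B side: properties of the pointer loop
theorem advance2_spec (s : Int) : ∀ n t, 1 ≤ n → t = pvT n → pvT (n - 1) < s →
    1 ≤ (advance2 s n t).1 ∧ (advance2 s n t).2 = pvT (advance2 s n t).1 ∧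
      s ≤ (advance2 s n t).2 ∧ pvT ((advance2 s n t).1 - 1) < s := by
  intro n t
  fun_induction advance2 s n t with
  | case1 n t h ih =>
    intro hn ht hlt
    refine ih (by omega) ?_ ?_
    · rw [ht, pvT_succ]
    · rw [show n + 1 - 1 = n by omega, ← ht]
      exact h
  | case2 n t h =>
    intro hn ht hlt
    exact ⟨hn, ht, by omega, hlt⟩

theorem advance2_tri (s n t : Int) (hn : 1 ≤ n) (ht : t = pvT n) (hlt : pvT (n - 1) < s) :
    ((advance2 s n t).2 = s) ↔ pvIsTri s := by
  obtain ⟨h1, h2, h3, h4⟩ := advance2_spec s n t hn ht hlt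
  rw [h2] at h3 ⊢
  constructor
  · intro h
    exact ⟨_, h1, h⟩
  · rintro ⟨k, hk1, hk2⟩
    have hlt1 : (advance2 s n t).1 - 1 < k := by
      by_contra hc
      have h5 := pvT_le_of_le (show (0:Int) ≤ k by omega)
        (show k ≤ (advance2 s n t).1 - 1 by omega)
      rw [hk2] at h5
      omega
    have hle2 : k ≤ (advance2 s n t).1 := by
      by_contra hc
      have h5 := pvT_lt_of_lt (show (0:Int) ≤ (advance2 s n t).1 by omega)
        (show (advance2 s n t).1 < k by omega)
      rw [hk2] at h5
      omega
    have hk : k = (advance2 s n t).1 := by omega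
    rw [← hk, hk2]

theorem inner_eq (limit a : Int) (ha : 1 ≤ a) (haL : a ≤ limit) :
    ∀ (fuel : Nat) (c : Int), fuel = (limit + 1 - c).toNat → a < c →
    ∀ (acc : Int × List (Int × Int)) (n t : Int), 1 ≤ n → t = pvT n →
      pvT (n - 1) < pvT a + pvT c →
    ((PySem.List.pyRange c (limit + 1) 1).foldl (bInnerStep (pvT a) a)
        (acc, pvT (c - 1), n, t)).1
      = (PySem.List.pyRange c (limit + 1) 1).foldl (aInnerStep limit a) acc := by
  intro fuel
  induction fuel with
  | zero =>
    intro c hf hc acc n t hn ht hlt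
    rw [PySem.List.pyRange_one_eq_nil (by omega)]
    rfl
  | succ fuel ih =>
    intro c hf hc acc n t hn ht hlt
    by_cases hcl : limit + 1 ≤ c
    · rw [PySem.List.pyRange_one_eq_nil hcl]
      rfl
    · rw [PySem.List.pyRange_one_cons (by omega)]
      simp only [List.foldl_cons]
      obtain ⟨h1, h2, h3, h4⟩ := advance2_spec (pvT a + pvT c) n t hn ht hlt
      have hd := pvT_double limit
      have hs_le : pvT a + pvT c ≤ limit * (limit + 1) := by
        have q1 := pvT_le_of_le (show (0:Int) ≤ a by omega) haL
        have q2 := pvT_le_of_le (show (0:Int) ≤ c by omega) (show c ≤ limit by omega)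
        omega
      have hcond : ((advance2 (pvT a + pvT c) n t).2 = pvT a + pvT c) ↔
          (PySem.Set.contains (triBuild (limit * (limit + 1)) 1 PySem.Set.empty)
            (pvT a + pvT c) = true) :=
        (advance2_tri (pvT a + pvT c) n t hn ht hlt).trans
          (triSet_contains limit _ hs_le).symm
      have hstep : bInnerStep (pvT a) a (acc, pvT (c - 1), n, t) c
          = (aInnerStep limit a acc c, pvT c,
              (advance2 (pvT a + pvT c) n t).1, (advance2 (pvT a + pvT c) n t).2) := by
        simp only [bInnerStep, aInnerStep, pvT_def, pvT_step]
        by_cases hT : (advance2 (pvT a + pvT c) n t).2 = pvT a + pvT c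
        · rw [if_pos hT, if_pos (hcond.mp hT)]
        · rw [if_neg hT, if_neg (fun h => hT (hcond.mpr h))]
      rw [hstep]
      have hinv : pvT ((advance2 (pvT a + pvT c) n t).1 - 1) < pvT a + pvT (c + 1) := by
        have := pvT_le_of_le (show (0:Int) ≤ c by omega) (show c ≤ c + 1 by omega)
        omega
      have hrec := ih (c + 1) (by omega) (by omega) (aInnerStep limit a acc c)
        (advance2 (pvT a + pvT c) n t).1 (advance2 (pvT a + pvT c) n t).2
        h1 h2 hinv
      rw [show c + 1 - 1 = c by omega] at hrec
      exact hrec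

theorem outer_eq (limit : Int) :
    ∀ (fuel : Nat) (c : Int), fuel = (limit + 1 - c).toNat → 1 ≤ c →
    ∀ (acc : Int × List (Int × Int)),
    ((PySem.List.pyRange c (limit + 1) 1).foldl (bOuterStep limit) (acc, pvT (c - 1))).1
      = (PySem.List.pyRange c (limit + 1) 1).foldl
          (fun acc a => (PySem.List.pyRange (a + 1) (limit + 1) 1).foldl (aInnerStep limit a) acc)
          acc := by
  intro fuel
  induction fuel with
  | zero =>
    intro c hf hc acc
    rw [PySem.List.pyRange_one_eq_nil (by omega)]
    rfl
  | succ fuel ih =>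
    intro c hf hc acc
    by_cases hcl : limit + 1 ≤ c
    · rw [PySem.List.pyRange_one_eq_nil hcl]
      rfl
    · rw [PySem.List.pyRange_one_cons (by omega)]
      simp only [List.foldl_cons]
      have hin := inner_eq limit c hc (by omega) (limit + 1 - (c + 1)).toNat (c + 1) rfl
        (by omega) acc c (pvT c) hc rfl ?_
      · have hstep : bOuterStep limit (acc, pvT (c - 1)) c
            = ((PySem.List.pyRange (c + 1) (limit + 1) 1).foldl (aInnerStep limit c) acc, pvT c) := by
          simp only [bOuterStep, pvT_step]
          rw [show c + 1 - 1 = c by omega] at hin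
          rw [hin]
        rw [hstep]
        have hrec := ih (c + 1) (by omega) (by omega)
          ((PySem.List.pyRange (c + 1) (limit + 1) 1).foldl (aInnerStep limit c) acc)
        rw [show c + 1 - 1 = c by omega] at hrec
        exact hrec
      · have := pvT_lt_of_lt (show (0:Int) ≤ c - 1 by omega) (show c - 1 < c by omega)
        have := pvT_nonneg (c + 1)
        omega

-- ===== VERDICT (by name: the statement is the Claim_ definition above) =====
theorem solve_spec : Claim_equal_solve := by
  intro limit _
  unfold Spec_solve
  rw [solve_eq_fold, solve_alt_eq_fold]
  have h := outer_eq limit (limit + 1 - 1).toNat 1 rfl (le_refl 1)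
    (((0 : Int), ([] : List (Int × Int))))
  rw [show (1:Int) - 1 = 0 by omega, show pvT 0 = 0 from rfl] at h
  exact h.symm
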